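-- pv_equiv track=rewrite | github.com/Zheng0428/Hyperdistill | hyperdistill/tasks/multiturn_all_distill.py | _get_turn_data
-- ===== SOURCE A (Python) =====
-- from typing import Any, Dict, List, Optional
--
-- def _get_turn_data(messages: List[Dict], turn_idx: int) -> tuple:
--     """Extract data for a specific turn.
--
--     Args:
--         messages: Original message list
--         turn_idx: Turn index (1-based)
--
--     Returns:
--         (previous_messages, current_user_msg, original_assistant_msg):
--         - previous_messages: All messages before current turn
--         - current_user_msg: Current turn's user message
--         - original_assistant_msg: Original assistant response (if exists)
--     """
--     previous_messages = []
--     current_user_msg = None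
--     original_assistant_msg = None
--     user_turns = 0
--
--     for msg in messages:
--         role = msg.get('role')
--
--         if role == 'system':
--             # Skip original system prompt (we'll use our own)
--             continue
--         elif role == 'user':
--             user_turns += 1
--             if user_turns < turn_idx:
--                 previous_messages.append(msg)
--             elif user_turns == turn_idx:
--                 current_user_msg = msg
--             else:
--                 break
--         elif role == 'assistant':
--             if user_turns < turn_idx:
--                 previous_messages.append(msg)
--             elif user_turns == turn_idx:
--                 original_assistant_msg = msg.get('content')
--                 break
--
--     return previous_messages, current_user_msg, original_assistant_msg
-- ===== SOURCE B (Python) =====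
-- from typing import Any, Dict, List, Optional
--
-- def _get_turn_data(messages: List[Dict], turn_idx: int) -> tuple:
--     """Filter to the conversation messages, locate the turn_idx-th user
--     message, and slice around it."""
--     convo = [m for m in messages if m.get('role') in ('user', 'assistant')]
--
--     pos = None
--     count = 0
--     for i, m in enumerate(convo):
--         if m.get('role') == 'user':
--             count += 1
--             if count == turn_idx:
--                 pos = i
--                 break
--
--     if pos is None:
--         # turn_idx beyond the last turn: everything is history;
--         # turn_idx <= 0: no such turn, nothing precedes it
--         return (convo, None, None) if count < turn_idx else ([], None, None)
--
--     orig = None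
--     follow = convo[pos + 1:]
--     if follow and follow[0].get('role') == 'assistant':
--         orig = follow[0].get('content')
--     return convo[:pos], convo[pos], orig
-- ===== Notes on version B (the rewrite author's own statement) =====
-- stated objective: alternative
-- what changed: Replaces A's single stateful loop (role dispatch + user-turn counter + break flags) by filter-then-index: filter to user/assistant messages, locate the index of the turn_idx-th user message, and build the three results by slicing around that index.
-- intended difference: When turn_idx = 0 and the first non-system message is an assistant message with a content key, A returns that assistant's content as original_assistant_msg although turn 0 does not exist; B returns ([], None, None), the intended value for a nonexistent turn. — e.g. on _get_turn_data([[("role", "assistant"), ("content", "hi")]], 0): A returns ([], none, some "hi"), B returns ([], none, none)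
import Mathlib
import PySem

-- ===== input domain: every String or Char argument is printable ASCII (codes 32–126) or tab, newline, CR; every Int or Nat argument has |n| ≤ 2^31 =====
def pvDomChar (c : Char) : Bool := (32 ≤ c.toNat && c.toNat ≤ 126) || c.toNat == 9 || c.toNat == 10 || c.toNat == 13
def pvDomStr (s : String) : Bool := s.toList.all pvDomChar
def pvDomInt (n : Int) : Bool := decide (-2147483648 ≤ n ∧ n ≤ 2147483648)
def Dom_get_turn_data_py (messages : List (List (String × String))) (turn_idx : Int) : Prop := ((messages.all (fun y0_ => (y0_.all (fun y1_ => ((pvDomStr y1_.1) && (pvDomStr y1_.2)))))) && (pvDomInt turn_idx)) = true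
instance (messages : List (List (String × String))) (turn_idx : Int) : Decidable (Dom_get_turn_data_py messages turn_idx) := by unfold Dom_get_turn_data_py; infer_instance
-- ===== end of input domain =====

-- B re-implements A by filter + index-of-target-user + slicing instead of A's single
-- stateful loop; equal everywhere except the D_ corner (turn_idx = 0 with a leading
-- assistant message), where B returns the intended empty result.

-- Python msg.get('role') / msg.get('content'): dict built from the assoc list.
def pvGet (m : List (String × String)) (k : String) : Option String :=
  (PySem.Dict.ofList m).get? k

-- ===== PORT A =====
def pvALoop (t : Int) :
    List (List (String × String)) → List (List (String × String)) →
    Option (List (String × String)) → Option String → Int →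
    List (List (String × String)) × Option (List (String × String)) × Option String
  | [], prev, cur, orig, _ => (prev, cur, orig)
  | msg :: rest, prev, cur, orig, ut =>
    let role := pvGet msg "role"
    if role = some "system" then pvALoop t rest prev cur orig ut
    else if role = some "user" then
      if ut + 1 < t then pvALoop t rest (prev ++ [msg]) cur orig (ut + 1)
      else if ut + 1 = t then pvALoop t rest prev (some msg) orig (ut + 1)
      else (prev, cur, orig)
    else if role = some "assistant" then
      if ut < t then pvALoop t rest (prev ++ [msg]) cur orig ut
      else if ut = t then (prev, cur, pvGet msg "content")
      else pvALoop t rest prev cur orig ut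
    else pvALoop t rest prev cur orig ut

def get_turn_data_py (messages : List (List (String × String))) (turn_idx : Int) :
    (List (List (String × String))) × (Option (List (String × String))) × Option String :=
  pvALoop turn_idx messages [] none none 0

-- ===== PORT B =====
def pvIsConvo (m : List (String × String)) : Bool :=
  pvGet m "role" == some "user" || pvGet m "role" == some "assistant"

-- locate the t-th user message (1-based): (index if found, running user count)
def pvScan (t : Int) : List (List (String × String)) → Int → Option Nat × Int
  | [], count => (none, count)
  | m :: rest, count =>
    if pvGet m "role" = some "user" then
      if count + 1 = t then (some 0, count + 1)
      else
        let r := pvScan t rest (count + 1)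
        (r.1.map (· + 1), r.2)
    else
      let r := pvScan t rest count
      (r.1.map (· + 1), r.2)

-- orig = follow[0].get('content') if follow and follow[0] is assistant else None
def pvOrig : List (List (String × String)) → Option String
  | [] => none
  | m :: _ => if pvGet m "role" = some "assistant" then pvGet m "content" else none

def get_turn_data_py_alt (messages : List (List (String × String))) (turn_idx : Int) :
    (List (List (String × String))) × (Option (List (String × String))) × Option String :=
  let convo := messages.filter pvIsConvo
  let r := pvScan turn_idx convo 0
  match r.1 with
  | some i => (convo.take i, convo[i]?, pvOrig (convo.drop (i + 1)))
  | none => if r.2 < turn_idx then (convo, none, none) else ([], none, none)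

-- ===== PRECONDITION & SPEC =====
-- shape conditions on the input, spelled over the raw assoc lists: a message's
-- effective role is the value of its last "role" entry (dict semantics), and a
-- key is present iff some pair carries it
def pvRoleIs (m : List (String × String)) (r : String) : Bool :=
  List.lookup "role" m.reverse == some r

def pvHasKey (m : List (String × String)) (k : String) : Bool :=
  m.any (fun p => p.1 == k)

-- the input's first message with a user/assistant role is an assistant message
-- carrying a content key
def pvHeadAssistantContent (messages : List (List (String × String))) : Bool :=
  (messages.find? (fun m => pvRoleIs m "user" || pvRoleIs m "assistant")).any
    (fun m => pvRoleIs m "assistant" && pvHasKey m "content")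

-- On turn_idx = 0 with a leading (non-system) assistant message carrying a content key,
-- A returns that assistant's content as original_assistant_msg although turn 0 does not
-- exist; B returns ([], none, none), the intended value for a nonexistent turn.
def D_get_turn_data_py (messages : List (List (String × String))) (turn_idx : Int) : Prop :=
  turn_idx = 0 ∧ pvHeadAssistantContent messages = true
instance (messages : List (List (String × String))) (turn_idx : Int) : Decidable (D_get_turn_data_py messages turn_idx) := by unfold D_get_turn_data_py; infer_instance

def Spec_get_turn_data_py (messages : List (List (String × String))) (turn_idx : Int) (out : (List (List (String × String))) × (Option (List (String × String))) × Option String) : Prop := ¬ D_get_turn_data_py messages turn_idx → out = get_turn_data_py_alt messages turn_idx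
instance (messages : List (List (String × String))) (turn_idx : Int) (out : (List (List (String × String))) × (Option (List (String × String))) × Option String) : Decidable (Spec_get_turn_data_py messages turn_idx out) := by unfold Spec_get_turn_data_py; infer_instance

def pvDiffWitness_get_turn_data_py : (List (List (String × String))) × Int :=
  ([[("role", "assistant"), ("content", "hi")]], 0)
def pvDiffWitnessOut_get_turn_data_py :
    ((List (List (String × String))) × (Option (List (String × String))) × Option String) ×
    ((List (List (String × String))) × (Option (List (String × String))) × Option String) :=
  (([], none, some "hi"), ([], none, none))

-- ===== CLAIM (what is proved, stated in full; the proofs are below) =====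
def Claim_unchanged_get_turn_data_py : Prop := ∀ (messages : List (List (String × String))) (turn_idx : Int), Dom_get_turn_data_py messages turn_idx → Spec_get_turn_data_py messages turn_idx (get_turn_data_py messages turn_idx)
def Claim_changed_get_turn_data_py : Prop := Dom_get_turn_data_py (pvDiffWitness_get_turn_data_py.1) (pvDiffWitness_get_turn_data_py.2) ∧ D_get_turn_data_py (pvDiffWitness_get_turn_data_py.1) (pvDiffWitness_get_turn_data_py.2) ∧ get_turn_data_py (pvDiffWitness_get_turn_data_py.1) (pvDiffWitness_get_turn_data_py.2) = pvDiffWitnessOut_get_turn_data_py.1 ∧ get_turn_data_py_alt (pvDiffWitness_get_turn_data_py.1) (pvDiffWitness_get_turn_data_py.2) = pvDiffWitnessOut_get_turn_data_py.2 ∧ pvDiffWitnessOut_get_turn_data_py.1 ≠ pvDiffWitnessOut_get_turn_data_py.2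
def Claim_exact_get_turn_data_py : Prop := ∀ (messages : List (List (String × String))) (turn_idx : Int), Dom_get_turn_data_py messages turn_idx → D_get_turn_data_py messages turn_idx → get_turn_data_py messages turn_idx ≠ get_turn_data_py_alt messages turn_idx

-- ===== LEMMAS AND PROOFS =====

-- common characterisation: result on a filtered list, by remaining user count k
def pvCore : List (List (String × String)) → Int →
    List (List (String × String)) × Option (List (String × String)) × Option String
  | [], _ => ([], none, none)
  | m :: rest, k =>
    if pvGet m "role" = some "user" then
      if 1 < k then let r := pvCore rest (k - 1); (m :: r.1, r.2)
      else if k = 1 then ([], some m, pvOrig rest)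
      else ([], none, none)
    else
      if 0 < k then let r := pvCore rest k; (m :: r.1, r.2)
      else if k = 0 then ([], none, pvGet m "content")
      else pvCore rest k

lemma pvIsConvo_iff (m : List (String × String)) :
    pvIsConvo m = true ↔ (pvGet m "role" = some "user" ∨ pvGet m "role" = some "assistant") := by
  simp [pvIsConvo]

-- A ignores messages B filters away
lemma pvALoop_filter (t : Int) (l : List (List (String × String))) :
    ∀ prev cur orig ut, pvALoop t l prev cur orig ut = pvALoop t (l.filter pvIsConvo) prev cur orig ut := by
  induction l with
  | nil => intro prev cur orig ut; rfl
  | cons m rest ih =>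
    intro prev cur orig ut
    by_cases hc : pvIsConvo m = true
    · rcases (pvIsConvo_iff m).1 hc with hr | hr <;>
      · rw [List.filter_cons_of_pos hc]
        simp only [pvALoop, hr]
        split_ifs <;> first | rfl | apply ih
    · have hu : ¬ pvGet m "role" = some "user" := fun h => hc ((pvIsConvo_iff m).2 (Or.inl h))
      have ha : ¬ pvGet m "role" = some "assistant" := fun h => hc ((pvIsConvo_iff m).2 (Or.inr h))
      rw [List.filter_cons_of_neg (by simpa using hc)]
      by_cases hs : pvGet m "role" = some "system"
      · simp only [pvALoop, if_pos hs]; apply ih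
      · simp only [pvALoop, if_neg hs, if_neg hu, if_neg ha]; apply ih

-- A after the current user message: only the immediately following convo message matters
lemma pvALoop_phase2 (t : Int) (l : List (List (String × String)))
    (h : ∀ m ∈ l, pvIsConvo m = true) (prev : List (List (String × String)))
    (cm : List (String × String)) :
    pvALoop t l prev (some cm) none t = (prev, some cm, pvOrig l) := by
  cases l with
  | nil => rfl
  | cons m rest =>
    rcases (pvIsConvo_iff m).1 (h m (by simp)) with hr | hr <;>
      simp [pvALoop, pvOrig, hr, show ¬ (t + 1 < t) by omega, show ¬ (t + 1 = t) by omega]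

-- A on a filtered list computes pvCore
lemma pvALoop_core (t : Int) (l : List (List (String × String))) :
    (∀ m ∈ l, pvIsConvo m = true) → ∀ prev ut,
    pvALoop t l prev none none ut =
      (prev ++ (pvCore l (t - ut)).1, (pvCore l (t - ut)).2.1, (pvCore l (t - ut)).2.2) := by
  induction l with
  | nil => intro _ prev ut; simp [pvALoop, pvCore]
  | cons m rest ih =>
    intro h prev ut
    have hrest : ∀ x ∈ rest, pvIsConvo x = true := fun x hx => h x (by simp [hx])
    rcases (pvIsConvo_iff m).1 (h m (by simp)) with hu | ha
    · by_cases h1 : ut + 1 < t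
      · have hk : 1 < t - ut := by omega
        have he : t - (ut + 1) = t - ut - 1 := by omega
        simp [pvALoop, pvCore, hu, h1, hk, ih hrest, he]
      · by_cases h2 : ut + 1 = t
        · have hk1 : ¬ (1 < t - ut) := by omega
          have hk : t - ut = 1 := by omega
          simp [pvALoop, pvCore, hu, h1, h2, hk1, hk, pvALoop_phase2 t rest hrest]
        · have hk1 : ¬ (1 < t - ut) := by omega
          have hk : ¬ (t - ut = 1) := by omega
          simp [pvALoop, pvCore, hu, h1, h2, hk1, hk]
    · by_cases h1 : ut < t
      · have hk : 0 < t - ut := by omega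
        simp [pvALoop, pvCore, ha, h1, hk, ih hrest]
      · by_cases h2 : ut = t
        · have hk0 : ¬ (0 < t - ut) := by omega
          have hk : t - ut = 0 := by omega
          simp [pvALoop, pvCore, ha, h1, h2, hk0, hk]
        · have hk0 : ¬ (0 < t - ut) := by omega
          have hk : ¬ (t - ut = 0) := by omega
          simp [pvALoop, pvCore, ha, h1, h2, hk0, hk, ih hrest]

lemma pvScan_count_ge (t : Int) (l : List (List (String × String))) :
    ∀ count, count ≤ (pvScan t l count).2 := by
  induction l with
  | nil => intro count; simp [pvScan]
  | cons m rest ih =>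
    intro count
    by_cases hu : pvGet m "role" = some "user"
    · by_cases h1 : count + 1 = t
      · simp [pvScan, hu, h1]
        omega
      · have := ih (count + 1)
        simp [pvScan, hu, h1]
        omega
    · have := ih count
      simp [pvScan, hu]
      omega

lemma pvScan_some_lt (t : Int) (l : List (List (String × String))) :
    ∀ count i, (pvScan t l count).1 = some i → count < t := by
  induction l with
  | nil => intro count i hsc; simp [pvScan] at hsc
  | cons m rest ih =>
    intro count i hsc
    by_cases hu : pvGet m "role" = some "user"
    · by_cases h1 : count + 1 = t
      · omega
      · simp [pvScan, hu, h1] at hsc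
        rcases hsc with ⟨j, hj, _⟩
        have := ih (count + 1) j hj
        omega
    · simp [pvScan, hu] at hsc
      rcases hsc with ⟨j, hj, _⟩
      exact ih count j hj

lemma pvScan_none_lt (t : Int) (l : List (List (String × String))) :
    ∀ count, (pvScan t l count).1 = none → count < t → (pvScan t l count).2 < t := by
  induction l with
  | nil => intro count _ hlt; simpa [pvScan]
  | cons m rest ih =>
    intro count hn hlt
    by_cases hu : pvGet m "role" = some "user"
    · by_cases h1 : count + 1 = t
      · simp [pvScan, hu, h1] at hn
      · simp [pvScan, hu, h1] at hn ⊢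
        exact ih (count + 1) hn (by omega)
    · simp [pvScan, hu] at hn ⊢
      exact ih count hn hlt

-- B's index-and-slice computation also computes pvCore
lemma pvScan_core (t : Int) (l : List (List (String × String))) :
    (∀ m ∈ l, pvIsConvo m = true) → ∀ count : Int,
    pvCore l (t - count) =
      (match (pvScan t l count).1 with
       | some i => (l.take i, l[i]?, pvOrig (l.drop (i + 1)))
       | none =>
         if (pvScan t l count).2 < t then (l, none, none)
         else if t = count then ([], none, pvOrig l)
         else ([], none, none)) := by
  induction l with
  | nil =>
    intro _ count
    simp only [pvScan, pvCore]
    split_ifs <;> simp [pvOrig]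
  | cons m rest ih =>
    intro h count
    have hrest : ∀ x ∈ rest, pvIsConvo x = true := fun x hx => h x (by simp [hx])
    rcases (pvIsConvo_iff m).1 (h m (by simp)) with hu | ha
    · by_cases h1 : count + 1 = t
      · have hk1 : ¬ (1 < t - count) := by omega
        have hk : t - count = 1 := by omega
        simp [pvScan, pvCore, hu, h1, hk1, hk]
      · have hIH := ih hrest (count + 1)
        by_cases hk1 : 1 < t - count
        · have he : t - (count + 1) = t - count - 1 := by omega
          rw [he] at hIH
          cases hsc : (pvScan t rest (count + 1)).1 with
          | some j =>
            rw [hsc] at hIH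
            simp [pvScan, pvCore, hu, h1, hk1, hsc, hIH]
          | none =>
            rw [hsc] at hIH
            have hfin : (pvScan t rest (count + 1)).2 < t :=
              pvScan_none_lt t rest (count + 1) hsc (by omega)
            rw [if_pos hfin] at hIH
            simp [pvScan, pvCore, hu, h1, hk1, hsc, hIH, hfin]
        · have hk : ¬ (t - count = 1) := by omega
          cases hsc : (pvScan t rest (count + 1)).1 with
          | some j =>
            have := pvScan_some_lt t rest (count + 1) j hsc
            omega
          | none =>
            have hge := pvScan_count_ge t rest (count + 1)
            have hfin : ¬ ((pvScan t rest (count + 1)).2 < t) := by omega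
            by_cases htc : t = count
            · subst htc
              simp [pvScan, pvCore, pvOrig, hu, h1, hk1, hk, hsc, hfin]
            · simp [pvScan, pvCore, hu, h1, hk1, hk, hsc, hfin, htc]
    · have hu : ¬ pvGet m "role" = some "user" := by simp [ha]
      have hIH := ih hrest count
      by_cases hk0 : 0 < t - count
      · cases hsc : (pvScan t rest count).1 with
        | some j =>
          rw [hsc] at hIH
          simp [pvScan, pvCore, hu, hk0, hsc, hIH]
          exact fun hle => absurd hle (by omega)
        | none =>
          rw [hsc] at hIH
          have hfin : (pvScan t rest count).2 < t :=
            pvScan_none_lt t rest count hsc (by omega)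
          rw [if_pos hfin] at hIH
          simp [pvScan, pvCore, hu, hk0, hsc, hIH, hfin]
          exact fun hle => absurd hle (by omega)
      · cases hsc : (pvScan t rest count).1 with
        | some j =>
          have := pvScan_some_lt t rest count j hsc
          omega
        | none =>
          rw [hsc] at hIH
          have hfin : ¬ ((pvScan t rest count).2 < t) := by
            have := pvScan_count_ge t rest count; omega
          rw [if_neg hfin] at hIH
          by_cases htc : t = count
          · subst htc
            simp [pvScan, pvCore, pvOrig, hu, ha, hsc, hfin, sub_self]
          · have hk : ¬ (t - count = 0) := by omega
            rw [if_neg htc] at hIH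
            simp [pvScan, pvCore, hu, hk0, hk, hsc, hfin, htc, hIH]
            omega

lemma pvFoldlInsert_get (k : String) (l : List (String × String)) :
    ∀ d : PySem.Dict String String,
    (l.foldl (fun d p => d.insert p.1 p.2) d).get? k = (List.lookup k l.reverse).or (d.get? k) := by
  induction l with
  | nil => intro d; simp
  | cons p rest ih =>
    intro d
    simp only [List.foldl_cons, ih, List.reverse_cons, List.lookup_append]
    rw [PySem.Dict.get?_insert]
    cases hl : List.lookup k rest.reverse <;>
      simp only [hl, Option.none_or, Option.some_or, List.lookup] <;>
      split_ifs with h <;>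
        first
          | rfl
          | simp [h]
          | (have hb : (k == p.1) = false := beq_eq_false_iff_ne.mpr h; simp [hb])

lemma pvGet_eq_revLookup (m : List (String × String)) (k : String) :
    pvGet m k = List.lookup k m.reverse := by
  have h0 : PySem.Dict.ofList m = m.foldl (fun d p => d.insert p.1 p.2) PySem.Dict.empty := rfl
  rw [pvGet, h0, pvFoldlInsert_get]
  simp

lemma pvLookup_isSome (k : String) (l : List (String × String)) :
    (List.lookup k l).isSome = l.any (fun p => p.1 == k) := by
  induction l with
  | nil => rfl
  | cons p rest ih =>
    simp only [List.lookup, List.any_cons]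
    cases hb : (k == p.1)
    · have h1 : (p.1 == k) = false :=
        beq_eq_false_iff_ne.mpr (fun h => (beq_eq_false_iff_ne.mp hb) h.symm)
      simp [h1, hb, ih]
    · have h1 : (p.1 == k) = true := by
        rw [beq_iff_eq] at hb ⊢; exact hb.symm
      simp [h1, hb]

lemma pvRoleIs_eq (m : List (String × String)) (r : String) :
    pvRoleIs m r = (pvGet m "role" == some r) := by
  rw [pvRoleIs, pvGet_eq_revLookup]

lemma pvHasKey_eq (m : List (String × String)) :
    pvHasKey m "content" = (pvGet m "content").isSome := by
  rw [pvHasKey, pvGet_eq_revLookup, pvLookup_isSome, List.any_reverse]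

lemma pvHAC_eq (messages : List (List (String × String))) :
    pvHeadAssistantContent messages =
      ((messages.filter pvIsConvo).head?.any
        (fun m => pvGet m "role" == some "assistant" && (pvGet m "content").isSome)) := by
  unfold pvHeadAssistantContent
  have hp : (fun m => pvRoleIs m "user" || pvRoleIs m "assistant") = pvIsConvo := by
    funext m
    rw [pvRoleIs_eq, pvRoleIs_eq, pvIsConvo]
  have hq : (fun m => pvRoleIs m "assistant" && pvHasKey m "content") =
      (fun m => pvGet m "role" == some "assistant" && (pvGet m "content").isSome) := by
    funext m
    rw [pvRoleIs_eq, pvHasKey_eq]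
  rw [hp, hq, List.head?_filter]

lemma pvOrig_filter_none (messages : List (List (String × String)))
    (h : ¬ pvHeadAssistantContent messages = true) :
    pvOrig (messages.filter pvIsConvo) = none := by
  rw [pvHAC_eq] at h
  cases hl : messages.filter pvIsConvo with
  | nil => rfl
  | cons m rest =>
    rw [hl] at h
    simp only [List.head?, Option.any_some] at h
    by_cases ha : pvGet m "role" = some "assistant"
    · have hnone : pvGet m "content" = none := by
        cases hg : pvGet m "content" with
        | none => rfl
        | some s => exact absurd (by simp [ha, hg]) h
      simp [pvOrig, ha, hnone]
    · simp [pvOrig, ha]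

-- ===== VERDICT (by name: the statement is the Claim_ definition above) =====
theorem get_turn_data_py_spec : Claim_unchanged_get_turn_data_py := by
  intro messages t _
  unfold Spec_get_turn_data_py
  intro hnd
  unfold get_turn_data_py get_turn_data_py_alt
  have hfilt : ∀ m ∈ messages.filter pvIsConvo, pvIsConvo m = true := by
    intro m hm; exact (List.mem_filter.1 hm).2
  rw [pvALoop_filter, pvALoop_core t _ hfilt]
  have hcore := pvScan_core t (messages.filter pvIsConvo) hfilt 0
  simp only [sub_zero] at hcore ⊢
  rw [hcore]
  cases hsc : (pvScan t (messages.filter pvIsConvo) 0).1 with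
  | some i => simp [hsc]
  | none =>
    simp only [hsc]
    split_ifs with hlt ht
    · rfl
    · have hna : ¬ pvHeadAssistantContent messages = true := by
        intro hh
        exact hnd ⟨by omega, hh⟩
      simp [pvOrig_filter_none messages hna]
    · simp

theorem get_turn_data_py_changed : Claim_changed_get_turn_data_py := by
  unfold Claim_changed_get_turn_data_py
  refine ⟨by decide, by decide, by decide, by decide, by decide⟩

theorem get_turn_data_py_tight : Claim_exact_get_turn_data_py := by
  intro messages t _ hd
  obtain ⟨ht, hhead⟩ := hd
  subst ht
  rw [pvHAC_eq] at hhead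
  cases hl : messages.filter pvIsConvo with
  | nil => rw [hl] at hhead; simp at hhead
  | cons m rest =>
    rw [hl] at hhead
    simp only [List.head?, Option.any_some, Bool.and_eq_true, beq_iff_eq] at hhead
    obtain ⟨ha, hcont⟩ := hhead
    have hu : ¬ pvGet m "role" = some "user" := by simp [ha]
    have hfilt : ∀ x ∈ messages.filter pvIsConvo, pvIsConvo x = true := by
      intro x hx; exact (List.mem_filter.1 hx).2
    have hA : get_turn_data_py messages 0 = ([], none, pvGet m "content") := by
      unfold get_turn_data_py
      rw [pvALoop_filter, pvALoop_core 0 _ hfilt, hl]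
      simp [pvCore, hu]
    have hscan1 : (pvScan 0 (m :: rest) 0).1 = none := by
      cases hs : (pvScan 0 (m :: rest) 0).1 with
      | none => rfl
      | some j => have := pvScan_some_lt 0 (m :: rest) 0 j hs; omega
    have hscan2 : ¬ ((pvScan 0 (m :: rest) 0).2 < 0) := by
      have := pvScan_count_ge 0 (m :: rest) 0; omega
    have hB : get_turn_data_py_alt messages 0 = ([], none, none) := by
      unfold get_turn_data_py_alt
      simp only [hl, hscan1, if_neg hscan2]
    rw [hA, hB]
    intro heq
    have hz : pvGet m "content" = none := congrArg (fun p => p.2.2) heq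
    rw [hz] at hcont
    simp at hcont
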